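-- pv_equiv track=rewrite | github.com/gbrlmza/programming-puzzles | googlecodejam/practice-contests/practice-problems/alien-numbers/solution.py | convert_to_language
-- ===== SOURCE A (Python) =====
-- import math
--
-- def convert_to_language(number, language):
--     '''Convert a number un base 10 to a given language'''
--     target_number = ""
--     digits = list(language)
--     base = len(language)
--
--     while number > 0:
--         target_number += digits[number % base]
--         number = math.floor(number / base)
--
--     target_number = target_number[::-1]
--     return target_number
-- ===== SOURCE B (Python) =====
-- import math
--
-- def convert_to_language(number, language):
--     '''Convert a number un base 10 to a given language'''
--     base = len(language)
--     if number <= 0: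
--         return ""
--     p = 1
--     while p * base <= number:
--         p *= base
--     out = []
--     while p > 0:
--         out.append(language[(number // p) % base])
--         p = p // base
--     return "".join(out)
-- ===== Notes on version B (the rewrite author's own statement) =====
-- stated objective: alternative
-- what changed: Instead of A's least-significant-first accumulation with floor(number/base) followed by a string reversal, B first finds the largest power of the base not exceeding the number and then emits digits most-significant first by dividing by descending powers, so no reversal and no repeated quotient chain.
import Mathlib
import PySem

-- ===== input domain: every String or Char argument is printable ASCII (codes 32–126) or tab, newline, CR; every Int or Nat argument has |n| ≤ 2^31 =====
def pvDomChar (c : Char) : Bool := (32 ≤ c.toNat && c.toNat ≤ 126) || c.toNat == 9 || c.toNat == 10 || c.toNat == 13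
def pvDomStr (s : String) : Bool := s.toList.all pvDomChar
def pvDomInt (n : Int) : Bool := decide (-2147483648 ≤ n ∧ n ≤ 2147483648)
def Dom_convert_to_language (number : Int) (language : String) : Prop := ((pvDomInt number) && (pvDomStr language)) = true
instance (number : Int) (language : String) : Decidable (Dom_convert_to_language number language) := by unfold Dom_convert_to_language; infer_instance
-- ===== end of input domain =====

-- B finds the largest power of the base ≤ number and then emits digits most-significant first by
-- dividing by descending powers, replacing A's least-significant-first accumulation + reversal;
-- same cost, a genuinely different digit-extraction algorithm.
-- A's math.floor(number/base) is ported as PySem.Int.floordiv: on Dom (|number| ≤ 2^31 < 2^53) the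
-- float division's floor equals integer floor division exactly.
-- The '1 < base' / '0 < p' parts of the guards only totalize the ports: with number > 0 both
-- Pythons fail there (base = 0: A raises ZeroDivisionError, B diverges; base = 1: both diverge);
-- Pre_ excludes exactly those inputs.

-- ===== PORT A =====
def convertLoopA (digits : List Char) (base : Int) (number : Int) (acc : List Char) : List Char :=
  if h : 1 < base ∧ 0 < number then
    convertLoopA digits base (PySem.Int.floordiv number base)
      (acc ++ [PySem.List.pyGetD digits (PySem.Int.mod number base) ' '])
  else acc
termination_by number.toNat
decreasing_by
  rw [PySem.Int.floordiv_eq_ediv_of_pos (by omega)]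
  have h1 : number / base < number := by
    rw [Int.ediv_lt_iff_lt_mul (by omega)]; nlinarith [h.1, h.2]
  omega

def convert_to_language (number : Int) (language : String) : String :=
  let digits := language.toList
  let base : Int := digits.length
  String.ofList ((convertLoopA digits base number []).reverse)

-- ===== PORT B =====
-- first loop of Source B: grow p by factors of base while p * base ≤ number
def findPowB (number base p : Int) : Int :=
  if h : 1 < base ∧ p * base ≤ number ∧ 0 < p then findPowB number base (p * base) else p
termination_by (number - p).toNat
decreasing_by
  have : p < p * base := by nlinarith [h.1, h.2.2]
  omega

-- second loop of Source B: emit language[(number // p) % base] while p > 0, shrinking p by // base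
def emitB (digits : List Char) (base number p : Int) : List Char :=
  if h : 1 < base ∧ 0 < p then
    PySem.List.pyGetD digits (PySem.Int.mod (PySem.Int.floordiv number p) base) ' '
      :: emitB digits base number (PySem.Int.floordiv p base)
  else []
termination_by p.toNat
decreasing_by
  rw [PySem.Int.floordiv_eq_ediv_of_pos (by omega)]
  have h1 : p / base < p := by
    rw [Int.ediv_lt_iff_lt_mul (by omega)]; nlinarith [h.1, h.2]
  omega

def convert_to_language_alt (number : Int) (language : String) : String :=
  let base : Int := language.toList.length
  if number ≤ 0 then ""
  else String.ofList (emitB language.toList base number (findPowB number base 1))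

-- ===== PRECONDITION & SPEC =====
-- Pre_ excludes number > 0 with a language of length 0 (Python A raises ZeroDivisionError, B
-- diverges) or length 1 (both Pythons loop forever).
def Pre_convert_to_language (number : Int) (language : String) : Prop :=
  number ≤ 0 ∨ 2 ≤ language.toList.length
instance (number : Int) (language : String) : Decidable (Pre_convert_to_language number language) := by
  unfold Pre_convert_to_language; infer_instance
def pvWitness_convert_to_language : Int × String := (42, "ab")

def Spec_convert_to_language (number : Int) (language : String) (out : String) : Prop := out = convert_to_language_alt number language
instance (number : Int) (language : String) (out : String) : Decidable (Spec_convert_to_language number language out) := by unfold Spec_convert_to_language; infer_instance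

-- ===== CLAIM =====
def Claim_equal_convert_to_language : Prop := ∀ (number : Int) (language : String), Dom_convert_to_language number language → Pre_convert_to_language number language → Spec_convert_to_language number language (convert_to_language number language)

-- ===== LEMMAS AND PROOFS =====
-- Proof-side canonical form: digits of n, most-significant first, by recursion on the quotient.
def revDig (digits : List Char) (base : Int) (n : Int) : List Char :=
  if h : 1 < base ∧ 0 < n then
    revDig digits base (n / base) ++ [PySem.List.pyGetD digits (PySem.Int.mod n base) ' ']
  else []
termination_by n.toNat
decreasing_by
  have h1 : n / base < n := by
    rw [Int.ediv_lt_iff_lt_mul (by omega)]; nlinarith [h.1, h.2]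
  omega

theorem convertLoopA_eq (digits : List Char) (base : Int) (number : Int) (acc : List Char) :
    convertLoopA digits base number acc = acc ++ (revDig digits base number).reverse := by
  fun_induction convertLoopA digits base number acc with
  | case1 n acc h ih =>
    rw [revDig, dif_pos h, ih, PySem.Int.floordiv_eq_ediv_of_pos (by omega)]
    simp
  | case2 n acc h =>
    rw [revDig, dif_neg h]
    simp

-- the last (j) digits of n, least-significant appended
def msb (digits : List Char) (base : Int) : Nat → Int → List Char
  | 0, _ => []
  | j + 1, n => msb digits base j (n / base) ++ [PySem.List.pyGetD digits (PySem.Int.mod n base) ' ']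

theorem msb_cons (digits : List Char) (base : Int) (hb : 1 < base) (j : Nat) (n : Int) :
    msb digits base (j + 1) n
      = PySem.List.pyGetD digits (PySem.Int.mod (n / base ^ j) base) ' ' :: msb digits base j n := by
  induction j generalizing n with
  | zero => simp [msb]
  | succ j ih =>
    show msb digits base (j + 1) (n / base) ++ _ = _
    rw [ih (n / base), Int.ediv_ediv_of_nonneg (show (0:Int) ≤ base by omega),
      ← pow_succ']
    rfl

theorem emitB_eq_msb (digits : List Char) (base : Int) (hb : 1 < base) (n : Int) (k : Nat) :
    emitB digits base n (base ^ k) = msb digits base (k + 1) n := by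
  induction k with
  | zero =>
    rw [show ((base:Int) ^ 0) = 1 from pow_zero base, emitB, dif_pos ⟨hb, one_pos⟩,
      PySem.Int.floordiv_eq_ediv_of_pos (show (0:Int) < 1 by norm_num),
      PySem.Int.floordiv_eq_ediv_of_pos (show (0:Int) < base by omega), Int.ediv_one,
      show (1:Int) / base = 0 from Int.ediv_eq_zero_of_lt (by omega) (by omega),
      emitB, dif_neg (by simp)]
    simp [msb]
  | succ k ih =>
    have hp : (0:Int) < base ^ (k + 1) := by positivity
    rw [emitB, dif_pos ⟨hb, hp⟩, PySem.Int.floordiv_eq_ediv_of_pos hp,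
      PySem.Int.floordiv_eq_ediv_of_pos (show (0:Int) < base by omega),
      show (base:Int) ^ (k + 1) / base = base ^ k by
        rw [pow_succ]; exact Int.mul_ediv_cancel _ (by omega),
      ih, msb_cons digits base hb (k + 1) n]

theorem msb_eq_revDig (digits : List Char) (base : Int) (hb : 1 < base) (k : Nat) (n : Int)
    (hlo : base ^ k ≤ n) (hhi : n < base ^ (k + 1)) :
    msb digits base (k + 1) n = revDig digits base n := by
  induction k generalizing n with
  | zero =>
    rw [pow_zero] at hlo
    have hn : 0 < n := by omega
    have hz : n / base = 0 :=
      Int.ediv_eq_zero_of_lt (by omega) (by simpa using hhi)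
    rw [revDig, dif_pos ⟨hb, hn⟩, hz, revDig, dif_neg (by simp)]
    simp [msb]
  | succ k ih =>
    have hbpos : (0:Int) < base := by omega
    have hpk : (0:Int) < base ^ (k + 1) := by positivity
    have hn : 0 < n := by omega
    have h1 : base ^ k ≤ n / base := by
      rw [Int.le_ediv_iff_mul_le hbpos, ← pow_succ]; exact hlo
    have h2 : n / base < base ^ (k + 1) := by
      rw [Int.ediv_lt_iff_lt_mul hbpos, ← pow_succ]; exact hhi
    show msb digits base (k + 1) (n / base) ++ _ = _
    rw [ih (n / base) h1 h2]
    conv_rhs => rw [revDig]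
    rw [dif_pos ⟨hb, hn⟩]

theorem findPowB_spec (number base : Int) (hb : 1 < base) (p : Int)
    (hp : ∃ j : Nat, p = base ^ j) (hle : p ≤ number) :
    ∃ k : Nat, findPowB number base p = base ^ k ∧ base ^ k ≤ number ∧ number < base ^ (k + 1) := by
  fun_induction findPowB number base p with
  | case1 p h ih =>
    obtain ⟨j, rfl⟩ := hp
    exact ih ⟨j + 1, by rw [pow_succ]⟩ h.2.1
  | case2 p h =>
    obtain ⟨j, rfl⟩ := hp
    refine ⟨j, rfl, hle, ?_⟩
    have hpos : (0:Int) < base ^ j := by positivity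
    have : ¬ base ^ j * base ≤ number := by tauto
    rw [pow_succ]; omega

-- ===== VERDICT =====
theorem convert_to_language_spec : Claim_equal_convert_to_language := by
  intro number language _ hpre
  unfold Spec_convert_to_language convert_to_language convert_to_language_alt
  simp only [convertLoopA_eq, List.nil_append, List.reverse_reverse]
  by_cases hn : number ≤ 0
  · rw [if_pos hn, revDig, dif_neg (by omega)]
  · have hb : 1 < (language.toList.length : Int) := by
      rcases hpre with h | h
      · omega
      · exact_mod_cast h
    rw [if_neg hn]
    obtain ⟨k, hfp, hlo, hhi⟩ :=
      findPowB_spec number (language.toList.length : Int) hb 1 ⟨0, by norm_num⟩ (by omega)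
    rw [hfp, emitB_eq_msb _ _ hb, msb_eq_revDig _ _ hb k number hlo hhi]
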